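-- pv_equiv track=rewrite | github.com/depressed-developed/zaklady-programovania-sifrovanie | affine.py | affine_bruteforce_decode
-- ===== SOURCE A (Python) =====
-- from math import gcd
--
-- def mod_inverse(a, m):
--     """Finds the modular inverse of a under modulo m."""
--     for x in range(1, m):
--         if (a * x) % m == 1:
--             return x
--     return None  # No modular inverse if gcd(a, m) != 1
--
-- def affine_decode(ciphertext, a, b):
--     """Decodes ciphertext encoded with the Affine cipher using keys a and b."""
--     m = 26  # Size of the alphabet
--     decoded_text = []
--     a_inv = mod_inverse(a, m)
--
--     if a_inv is None:
--         raise ValueError(f"No modular inverse for a={a} under modulo {m}")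
--
--     for char in ciphertext.upper():
--         if char.isalpha():  # Decode only alphabet characters
--             y = ord(char) - ord('A')
--             decoded_char = (a_inv * (y - b)) % m
--             decoded_text.append(chr(decoded_char + ord('A')))
--         else:
--             decoded_text.append(char)  # Keep non-alphabet characters as is
--
--     return "".join(decoded_text)
--
-- def affine_bruteforce_decode(ciphertext):
--     """Brute-force decodes an Affine cipher by trying all possible a and b values."""
--     m = 26  # Size of the alphabet
--     possible_decodings = []
--
--     for a in range(1, m):
--         if gcd(a, m) == 1:  # Only consider values of a that are coprime with m
--             for b in range(m):
--                 try:
--                     decoded_text = affine_decode(ciphertext, a, b)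
--                     possible_decodings.append((a, b, decoded_text))
--                 except ValueError:
--                     continue  # Skip if there's no modular inverse for this a
--
--     return possible_decodings
-- ===== SOURCE B (Python) =====
-- from math import gcd
--
-- def affine_bruteforce_decode(ciphertext):
--     """Brute-force affine decode: precompute the inverse per coprime a (Euler:
--     a^-1 = a^11 mod 26) and a 26-entry substitution table per key, then map
--     characters through the table instead of doing per-character arithmetic."""
--     upper = ciphertext.upper()
--     out = []
--     for a in range(1, 26):
--         if gcd(a, 26) != 1:
--             continue
--         a_inv = a ** 11 % 26
--         for b in range(26):
--             table = [chr((a_inv * (y - b)) % 26 + 65) for y in range(26)]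
--             decoded = ''.join(
--                 table[ord(c) - 65] if 'A' <= c <= 'Z' else c for c in upper)
--             out.append((a, b, decoded))
--     return out
-- ===== Notes on version B (the rewrite author's own statement) =====
-- stated objective: idiomatic
-- what changed: B precomputes the modular inverse once per coprime a via the closed form a^11 mod 26 (Euler) and builds a 26-entry substitution table per key, decoding by table lookup, instead of A's linear inverse search inside every affine_decode call and per-character modular arithmetic with a try/except.
import Mathlib
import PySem

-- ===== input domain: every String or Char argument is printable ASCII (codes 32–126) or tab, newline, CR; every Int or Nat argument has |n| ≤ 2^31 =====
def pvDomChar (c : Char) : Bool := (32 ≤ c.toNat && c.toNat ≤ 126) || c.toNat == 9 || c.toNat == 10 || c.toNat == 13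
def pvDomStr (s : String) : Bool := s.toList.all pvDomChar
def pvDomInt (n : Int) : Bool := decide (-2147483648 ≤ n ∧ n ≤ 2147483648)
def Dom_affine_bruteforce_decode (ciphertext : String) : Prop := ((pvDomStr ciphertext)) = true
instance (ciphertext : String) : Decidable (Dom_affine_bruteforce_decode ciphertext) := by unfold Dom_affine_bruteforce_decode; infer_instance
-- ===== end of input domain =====

set_option maxHeartbeats 1000000


-- B replaces A's per-key inverse search and per-character modular arithmetic by a
-- closed-form inverse (a^11 mod 26) and a precomputed 26-entry substitution table per key.

-- ===== PORT A =====
-- loop of mod_inverse: first x in range(1, m) with (a*x) % m == 1 (early return)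
def mod_inverse_loop (a m : Int) : List Int → Option Int
  | [] => none
  | x :: rest =>
      if PySem.Int.mod (a * x) m = 1 then some x else mod_inverse_loop a m rest

def mod_inverse (a m : Int) : Option Int :=
  mod_inverse_loop a m (PySem.List.pyRange 1 m)

-- affine_decode; `none` is exactly the ValueError raise (caught by the caller)
def affine_decode (ciphertext : String) (a b : Int) : Option String :=
  match mod_inverse a 26 with
  | none => none
  | some a_inv =>
      some (String.mk ((PySem.Str.upper ciphertext).toList.foldl
        (fun acc c =>
          if PySem.Chars.isalpha c then
            acc ++ [Char.ofNat ((PySem.Int.mod (a_inv * (((c.toNat : Int) - 65) - b)) 26) + 65).toNat]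
          else
            acc ++ [c]) []))

def affine_bruteforce_decode (ciphertext : String) : List (Int × Int × String) :=
  (PySem.List.pyRange 1 26).foldl
    (fun acc a =>
      if Int.gcd a 26 = 1 then
        (PySem.List.pyRange 0 26).foldl
          (fun acc b =>
            match affine_decode ciphertext a b with
            | none => acc
            | some s => acc ++ [(a, b, s)]) acc
      else acc) []

-- ===== PORT B =====
-- table[i] is provably in range under the guard, so pyGetD's default is never used
def affine_bruteforce_decode_alt (ciphertext : String) : List (Int × Int × String) :=
  let upper := (PySem.Str.upper ciphertext).toList
  (PySem.List.pyRange 1 26).foldl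
    (fun acc a =>
      if Int.gcd a 26 ≠ 1 then acc
      else
        let a_inv := PySem.Int.mod (a ^ 11) 26
        (PySem.List.pyRange 0 26).foldl
          (fun acc b =>
            let table := (PySem.List.pyRange 0 26).map
              (fun y => Char.ofNat ((PySem.Int.mod (a_inv * (y - b)) 26) + 65).toNat)
            let decoded := String.mk (upper.map
              (fun c => if 'A' ≤ c ∧ c ≤ 'Z' then PySem.List.pyGetD table ((c.toNat : Int) - 65) c else c))
            acc ++ [(a, b, decoded)]) acc) []

-- ===== PRECONDITION & SPEC =====
def Spec_affine_bruteforce_decode (ciphertext : String) (out : List (Int × Int × String)) : Prop := out = affine_bruteforce_decode_alt ciphertext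
instance (ciphertext : String) (out : List (Int × Int × String)) : Decidable (Spec_affine_bruteforce_decode ciphertext out) := by unfold Spec_affine_bruteforce_decode; infer_instance

-- ===== CLAIM (what is proved, stated in full; the proofs are below) =====
def Claim_equal_affine_bruteforce_decode : Prop := ∀ (ciphertext : String), Dom_affine_bruteforce_decode ciphertext → Spec_affine_bruteforce_decode ciphertext (affine_bruteforce_decode ciphertext)

-- ===== LEMMAS AND PROOFS =====
theorem char_toNat_ofNat (n : Nat) (h : n < 55296) : (Char.ofNat n).toNat = n := by
  unfold Char.ofNat; simp [Nat.isValidChar, h]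

theorem char_le_iff (a b : Char) : a ≤ b ↔ a.toNat ≤ b.toNat := by
  rw [Char.le_def, UInt32.le_iff_toNat_le]; rfl

-- after upper(), no character is an ASCII lowercase letter
theorem islower_upperChar (c : Char) : PySem.Chars.islower (PySem.Chars.upperChar c) = false := by
  unfold PySem.Chars.upperChar
  by_cases h : PySem.Chars.islower c = true
  · have hc : 97 ≤ c.toNat ∧ c.toNat ≤ 122 := by
      unfold PySem.Chars.islower at h
      simp only [Bool.and_eq_true, decide_eq_true_eq, char_le_iff] at h
      exact h
    simp only [h, if_true]
    unfold PySem.Chars.islower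
    simp only [Bool.and_eq_false_iff, decide_eq_false_iff_not, char_le_iff,
      char_toNat_ofNat (c.toNat - 32) (by omega)]
    have h97 : 'a'.toNat = 97 := rfl
    left; omega
  · simp [h]

-- the per-character maps of the two ports agree on any non-lowercase character
theorem char_step_eq (a_inv b : Int) (c : Char) (hl : PySem.Chars.islower c = false) :
    (if PySem.Chars.isalpha c then
        Char.ofNat ((PySem.Int.mod (a_inv * (((c.toNat : Int) - 65) - b)) 26) + 65).toNat
      else c)
    = (if 'A' ≤ c ∧ c ≤ 'Z' then
        PySem.List.pyGetD ((PySem.List.pyRange 0 26).map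
          (fun y => Char.ofNat ((PySem.Int.mod (a_inv * (y - b)) 26) + 65).toNat))
          ((c.toNat : Int) - 65) c
      else c) := by
  unfold PySem.Chars.isalpha
  rw [hl]
  by_cases hu : PySem.Chars.isupper c = true
  · have hc : 65 ≤ c.toNat ∧ c.toNat ≤ 90 := by
      unfold PySem.Chars.isupper at hu
      simp only [Bool.and_eq_true, decide_eq_true_eq, char_le_iff] at hu
      exact hu
    have hA : 'A'.toNat = 65 := rfl
    have hZ : 'Z'.toNat = 90 := rfl
    have hg : 'A' ≤ c ∧ c ≤ 'Z' := by
      constructor <;> rw [char_le_iff] <;> omega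
    rw [if_pos hg]
    simp only [hu, Bool.or_false, if_true]
    have hk : ((c.toNat : Int) - 65) = ((c.toNat - 65 : Nat) : Int) := by omega
    rw [hk, show (PySem.List.pyRange 0 26 : List Int) = PySem.List.pyRange 0 ((26 : Nat) : Int) from rfl,
      PySem.List.pyGetD_map_pyRange _ 26 (c.toNat - 65) _ (by omega)]
  · have hA : 'A'.toNat = 65 := rfl
    have hZ : 'Z'.toNat = 90 := rfl
    have hc : ¬ (65 ≤ c.toNat ∧ c.toNat ≤ 90) := by
      intro h
      apply hu
      unfold PySem.Chars.isupper
      simp only [Bool.and_eq_true, decide_eq_true_eq, char_le_iff]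
      omega
    have hg : ¬ ('A' ≤ c ∧ c ≤ 'Z') := by
      intro h
      have h1 := (char_le_iff _ _).mp h.1
      have h2 := (char_le_iff _ _).mp h.2
      omega
    simp [hu, hg]

-- A's decode equals B's table decode, whenever mod_inverse returns a^11 % 26
theorem decode_eq (ciphertext : String) (a b : Int)
    (hinv : mod_inverse a 26 = some (PySem.Int.mod (a ^ 11) 26)) :
    affine_decode ciphertext a b =
      some (String.mk ((PySem.Str.upper ciphertext).toList.map
        (fun c =>
          if 'A' ≤ c ∧ c ≤ 'Z' then
            PySem.List.pyGetD ((PySem.List.pyRange 0 26).map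
              (fun y => Char.ofNat ((PySem.Int.mod ((PySem.Int.mod (a ^ 11) 26) * (y - b)) 26) + 65).toNat))
              ((c.toNat : Int) - 65) c
          else c))) := by
  unfold affine_decode
  rw [hinv]
  refine congrArg some (congrArg String.mk ?_)
  have hbody : (fun (acc : List Char) (c : Char) =>
      if PySem.Chars.isalpha c then
        acc ++ [Char.ofNat ((PySem.Int.mod ((PySem.Int.mod (a ^ 11) 26) * (((c.toNat : Int) - 65) - b)) 26) + 65).toNat]
      else acc ++ [c])
      = (fun acc c => acc ++ [if PySem.Chars.isalpha c then
          Char.ofNat ((PySem.Int.mod ((PySem.Int.mod (a ^ 11) 26) * (((c.toNat : Int) - 65) - b)) 26) + 65).toNat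
        else c]) := by
    funext acc c
    by_cases h : PySem.Chars.isalpha c = true <;> simp [h]
  rw [hbody, PySem.List.foldl_append_singleton_eq_map, List.nil_append]
  apply List.map_congr_left
  intro c hc
  have : ∃ c0, PySem.Chars.upperChar c0 = c := by
    simp only [PySem.Str.toList_upper, PySem.Chars.upper, List.mem_map] at hc
    obtain ⟨c0, _, h0⟩ := hc
    exact ⟨c0, h0⟩
  obtain ⟨c0, rfl⟩ := this
  exact char_step_eq _ b _ (islower_upperChar c0)

-- swap an if-not into an if (used to line the two outer loop bodies up)
theorem ite_not_cond {α : Type} (c : Prop) [Decidable c] (x y : α) :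
    (if ¬ c then x else y) = if c then y else x := by
  by_cases h : c <;> simp [h]

-- the inner b-loops agree for a coprime a
theorem inner_eq (ciphertext : String) (a : Int)
    (hinv : mod_inverse a 26 = some (PySem.Int.mod (a ^ 11) 26)) (acc : List (Int × Int × String)) :
    (PySem.List.pyRange 0 26).foldl
      (fun acc b =>
        match affine_decode ciphertext a b with
        | none => acc
        | some s => acc ++ [(a, b, s)]) acc
    = (PySem.List.pyRange 0 26).foldl
      (fun acc b =>
        let a_inv := PySem.Int.mod (a ^ 11) 26
        let table := (PySem.List.pyRange 0 26).map
          (fun y => Char.ofNat ((PySem.Int.mod (a_inv * (y - b)) 26) + 65).toNat)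
        let decoded := String.mk ((PySem.Str.upper ciphertext).toList.map
          (fun c => if 'A' ≤ c ∧ c ≤ 'Z' then PySem.List.pyGetD table ((c.toNat : Int) - 65) c else c))
        acc ++ [(a, b, decoded)]) acc := by
  apply PySem.List.foldl_congr_mem
  intro acc b _
  rw [decode_eq ciphertext a b hinv]

-- ===== VERDICT (by name: the statement is the Claim_ definition above) =====
theorem affine_bruteforce_decode_spec : Claim_equal_affine_bruteforce_decode := by
  intro ciphertext _
  unfold Spec_affine_bruteforce_decode
  unfold affine_bruteforce_decode affine_bruteforce_decode_alt
  have h25 : PySem.List.pyRange 1 26 = [1,2,3,4,5,6,7,8,9,10,11,12,13,14,15,16,17,18,19,20,21,22,23,24,25] := by decide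
  rw [h25]
  apply Eq.symm
  apply PySem.List.foldl_congr_mem
  have hinv_all : ∀ a ∈ ([1,2,3,4,5,6,7,8,9,10,11,12,13,14,15,16,17,18,19,20,21,22,23,24,25] : List Int),
      Int.gcd a 26 = 1 → mod_inverse a 26 = some (PySem.Int.mod (a ^ 11) 26) := by decide
  intro acc a ha
  rw [ite_not_cond]
  by_cases hgcd : Int.gcd a 26 = 1
  · rw [if_pos hgcd, if_pos hgcd]
    exact (inner_eq ciphertext a (hinv_all a ha hgcd) acc).symm
  · rw [if_neg hgcd, if_neg hgcd]
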